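-- pv_equiv track=rewrite | github.com/pavodev/lcp | lcpvian/query_classes.py | segment_ids_in_results
-- ===== SOURCE A (Python) =====
-- def segment_ids_in_results(
--     results: list, kwic_keys: list[str], offset: int = 0, upper: int | None = None
-- ) -> dict[str, int]:
--     """
--     Return the unique segment IDs listed in the results for the provided offset+upper
--     """
--     counter = -1
--     segment_ids: dict[str, int] = {}
--     for key, (sid, *_) in results:
--         if str(key) not in kwic_keys:
--             continue
--         counter += 1
--         if counter < offset:
--             continue
--         if upper is not None and counter >= upper:
--             break
--         segment_ids[str(sid)] = 1
--     return segment_ids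
-- ===== SOURCE B (Python) =====
-- def segment_ids_in_results(results, kwic_keys, offset=0, upper=None):
--     # Project out the segment ids of the kwic-keyed rows.
--     keys = set(kwic_keys)
--     matched = [str(sid) for key, (sid, *_) in results if str(key) in keys]
--     # A's counter/continue/break window is exactly the slice [max(offset,0) : max(upper,0)].
--     lo = max(offset, 0)
--     hi = len(matched) if upper is None else max(upper, 0)
--     return dict.fromkeys(matched[lo:hi], 1)
-- ===== Notes on version B (the rewrite author's own statement) =====
-- stated objective: faster
-- what changed: Replaces A's interleaved loop with a -1-initialised counter, continue and break by a hashed-set filtered projection followed by closed-form slice bounds (lo=max(offset,0), hi=max(upper,0) or len) and dict.fromkeys for the dedup: no windowing loop, counter or per-row list scan remains.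
import Mathlib
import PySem

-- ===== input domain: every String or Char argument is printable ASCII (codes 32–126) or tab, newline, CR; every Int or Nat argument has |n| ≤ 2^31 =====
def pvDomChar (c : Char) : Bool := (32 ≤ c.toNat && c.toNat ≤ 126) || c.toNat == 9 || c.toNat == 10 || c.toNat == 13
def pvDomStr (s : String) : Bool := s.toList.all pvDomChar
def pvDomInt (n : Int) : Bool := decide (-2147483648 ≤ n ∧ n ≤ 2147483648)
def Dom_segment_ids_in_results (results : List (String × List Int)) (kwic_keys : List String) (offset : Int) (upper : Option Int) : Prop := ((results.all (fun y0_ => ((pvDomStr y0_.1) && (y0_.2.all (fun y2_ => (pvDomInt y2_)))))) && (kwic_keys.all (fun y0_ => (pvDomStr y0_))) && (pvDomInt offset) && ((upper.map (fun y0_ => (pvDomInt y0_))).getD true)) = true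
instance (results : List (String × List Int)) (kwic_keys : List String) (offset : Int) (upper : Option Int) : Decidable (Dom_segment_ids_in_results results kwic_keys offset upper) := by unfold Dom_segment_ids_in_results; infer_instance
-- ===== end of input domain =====

-- B replaces A's interleaved counter/continue/break loop by a filtered projection, closed-form slice bounds and dict.fromkeys; equal return values; a timing run measured B faster (hashed-set filter vs per-row list scan).


-- ===== PORT A =====
-- A's loop: counter starts at -1, 'continue' on non-kwic keys, 'break' when counter >= upper.
-- sid = head of the value list; Pre_ excludes empty value lists (Python unpacking raises there), headD 0 is a placeholder.
def pvALoop (kwic_keys : List String) (offset : Int) (upper : Option Int) :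
    List (String × List Int) → Int → PySem.Dict String Int → PySem.Dict String Int
  | [], _, d => d
  | (key, vs) :: rest, counter, d =>
    if !(kwic_keys.contains key) then
      pvALoop kwic_keys offset upper rest counter d
    else
      let counter' := counter + 1
      if counter' < offset then
        pvALoop kwic_keys offset upper rest counter' d
      else if (match upper with | some u => decide (counter' ≥ u) | none => false) then
        d
      else
        pvALoop kwic_keys offset upper rest counter' (d.insert (PySem.Int.toStr (vs.headD 0)) 1)

def segment_ids_in_results (results : List (String × List Int)) (kwic_keys : List String) (offset : Int) (upper : Option Int) : List (String × Int) :=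
  (pvALoop kwic_keys offset upper results (-1) PySem.Dict.empty).items

-- ===== PORT B =====
-- Source B: keys = set(kwic_keys); matched = [str(sid) …]; lo/hi closed-form; dict.fromkeys(matched[lo:hi], 1).
-- dict.fromkeys(xs, 1) is the ordered dedup of xs with value 1 (PySem.List.dedup, per the prelude).
def segment_ids_in_results_alt (results : List (String × List Int)) (kwic_keys : List String) (offset : Int) (upper : Option Int) : List (String × Int) :=
  let keys := PySem.Set.ofList kwic_keys
  let matched := (results.filter (fun p => PySem.Set.contains keys p.1)).map (fun p => PySem.Int.toStr (p.2.headD 0))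
  let lo : Int := max offset 0
  let hi : Int := match upper with | none => PySem.List.len matched | some u => max u 0
  (PySem.List.dedup (PySem.List.slice matched (some lo) (some hi))).map (fun s => (s, (1 : Int)))

-- ===== PRECONDITION & SPEC =====
-- Pre_ excludes results items whose value list is empty: the tuple unpacking 'key, (sid, *_)' raises ValueError there in both Pythons.
def Pre_segment_ids_in_results (results : List (String × List Int)) (kwic_keys : List String) (offset : Int) (upper : Option Int) : Prop :=
  ∀ p ∈ results, p.2 ≠ []
instance (results : List (String × List Int)) (kwic_keys : List String) (offset : Int) (upper : Option Int) : Decidable (Pre_segment_ids_in_results results kwic_keys offset upper) := by unfold Pre_segment_ids_in_results; infer_instance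

def pvWitness_segment_ids_in_results : (List (String × List Int)) × List String × Int × Option Int :=
  ([("a", [3, 9]), ("b", [4]), ("a", [5])], ["a"], 0, some 2)

def Spec_segment_ids_in_results (results : List (String × List Int)) (kwic_keys : List String) (offset : Int) (upper : Option Int) (out : List (String × Int)) : Prop := out = segment_ids_in_results_alt results kwic_keys offset upper
instance (results : List (String × List Int)) (kwic_keys : List String) (offset : Int) (upper : Option Int) (out : List (String × Int)) : Decidable (Spec_segment_ids_in_results results kwic_keys offset upper out) := by unfold Spec_segment_ids_in_results; infer_instance

-- ===== CLAIM (what is proved, stated in full; the proofs are below) =====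
def Claim_equal_segment_ids_in_results : Prop := ∀ (results : List (String × List Int)) (kwic_keys : List String) (offset : Int) (upper : Option Int), Dom_segment_ids_in_results results kwic_keys offset upper → Pre_segment_ids_in_results results kwic_keys offset upper → Spec_segment_ids_in_results results kwic_keys offset upper (segment_ids_in_results results kwic_keys offset upper)

-- ===== LEMMAS AND PROOFS =====
-- Proof-only intermediate: A's loop body re-read as a window pass with an explicit index.
def pvWin (offset : Int) (upper : Option Int) :
    List String → Int → PySem.Dict String Int → PySem.Dict String Int
  | [], _, d => d
  | s :: rest, idx, d =>
    if idx < offset then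
      pvWin offset upper rest (idx + 1) d
    else if (match upper with | some u => decide (idx ≥ u) | none => false) then
      d
    else
      pvWin offset upper rest (idx + 1) (d.insert s 1)

-- A's counter after k matches is k-1: A's loop equals the window pass over the filtered projection.
theorem pvLoop_eq (kwic_keys : List String) (offset : Int) (upper : Option Int) :
    ∀ (l : List (String × List Int)) (k : Int) (d : PySem.Dict String Int),
      pvALoop kwic_keys offset upper l k d =
      pvWin offset upper ((l.filter (fun p => kwic_keys.contains p.1)).map (fun p => PySem.Int.toStr (p.2.headD 0))) (k + 1) d := by
  intro l
  induction l with
  | nil => intro k d; simp [pvALoop, pvWin]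
  | cons p rest ih =>
    intro k d
    obtain ⟨key, vs⟩ := p
    by_cases h : kwic_keys.contains key = true
    · rw [List.filter_cons_of_pos (by simpa using h), List.map_cons]
      simp only [pvALoop, pvWin, h, Bool.not_true, Bool.false_eq_true, if_false]
      split_ifs with h1 h2
      · exact ih (k + 1) d
      · rfl
      · exact ih (k + 1) _
    · rw [List.filter_cons_of_neg (by simpa using h)]
      have hb : kwic_keys.contains key = false := Bool.not_eq_true _ |>.mp h
      simp only [pvALoop, hb, Bool.not_false, if_true]
      exact ih k d

-- The window pass, started at a nonnegative index, is a fold over a take/drop window.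
theorem pvWin_none (offset : Int) :
    ∀ (F : List String) (idx : Nat) (d : PySem.Dict String Int),
      pvWin offset none F (idx : Int) d =
      (F.drop (offset.toNat - idx)).foldl (fun d s => d.insert s 1) d := by
  intro F
  induction F with
  | nil => intro idx d; simp [pvWin]
  | cons s rest ih =>
    intro idx d
    by_cases h : (idx : Int) < offset
    · have h1 : offset.toNat - idx = (offset.toNat - (idx + 1)) + 1 := by omega
      simp only [pvWin, h, if_true, h1, List.drop_succ_cons]
      have := ih (idx + 1) d
      push_cast at this ⊢
      exact this
    · have h1 : offset.toNat - idx = 0 := by omega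
      simp only [pvWin, h, if_false, h1, List.drop_zero, List.foldl_cons]
      have h2 : offset.toNat - (idx + 1) = 0 := by omega
      have := ih (idx + 1) (d.insert s 1)
      rw [h2, List.drop_zero] at this
      push_cast at this ⊢
      exact this

theorem pvWin_some (offset u : Int) :
    ∀ (F : List String) (idx : Nat) (d : PySem.Dict String Int),
      pvWin offset (some u) F (idx : Int) d =
      ((F.take (u.toNat - idx)).drop (offset.toNat - idx)).foldl (fun d s => d.insert s 1) d := by
  intro F
  induction F with
  | nil => intro idx d; simp [pvWin]
  | cons s rest ih =>
    intro idx d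
    by_cases h : (idx : Int) < offset
    · simp only [pvWin, h, if_true]
      by_cases hu : u.toNat - idx = 0
      · have hu' : u.toNat - (idx + 1) = 0 := by omega
        have := ih (idx + 1) d
        rw [hu', List.take_zero] at this
        rw [hu, List.take_zero]
        push_cast at this ⊢
        simp only [List.drop_nil] at this ⊢
        exact this
      · have h1 : u.toNat - idx = (u.toNat - (idx + 1)) + 1 := by omega
        have h2 : offset.toNat - idx = (offset.toNat - (idx + 1)) + 1 := by omega
        rw [h1, List.take_succ_cons, h2, List.drop_succ_cons]
        have := ih (idx + 1) d
        push_cast at this ⊢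
        exact this
    · by_cases hb : u ≤ (idx : Int)
      · have hbr : (match (some u : Option Int) with | some v => decide ((idx : Int) ≥ v) | none => false) = true := by
          simpa using hb
        have hu : u.toNat - idx = 0 := by omega
        simp only [pvWin, h, if_false, hbr, if_true, hu, List.take_zero, List.drop_nil, List.foldl_nil]
      · have hbr : (match (some u : Option Int) with | some v => decide ((idx : Int) ≥ v) | none => false) = false := by
          simpa using not_le.mpr (not_le.mp hb)
        have h1 : u.toNat - idx = (u.toNat - (idx + 1)) + 1 := by omega
        have h2 : offset.toNat - idx = 0 := by omega
        have h3 : offset.toNat - (idx + 1) = 0 := by omega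
        simp only [pvWin, h, if_false, hbr, h1, List.take_succ_cons, h2, List.drop_zero, List.foldl_cons]
        have := ih (idx + 1) (d.insert s 1)
        rw [h3, List.drop_zero] at this
        push_cast at this ⊢
        exact this

-- Every value stored by the insert-1 fold is 1.
theorem pvFold_values : ∀ (L : List String) (d : PySem.Dict String Int),
    (∀ w ∈ d.values, w = (1 : Int)) →
    ∀ w ∈ (L.foldl (fun d s => d.insert s 1) d).values, w = (1 : Int) := by
  intro L
  induction L with
  | nil => intro d h; simpa using h
  | cons s rest ih =>
    intro d h
    refine ih (d.insert s 1) ?_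
    intro w hw
    rcases PySem.Dict.mem_values_insert d s 1 w hw with h1 | h1
    · exact h1
    · exact h w h1

-- The items of the insert-1 fold from empty are the ordered dedup, each paired with 1.
theorem pvFold_items (L : List String) :
    (L.foldl (fun d s => d.insert s 1) PySem.Dict.empty).items
      = (PySem.List.dedup L).map (fun s => (s, (1 : Int))) := by
  set d := L.foldl (fun d s => d.insert s (1 : Int)) PySem.Dict.empty with hd
  have hnd : d.keys.Nodup := PySem.Dict.nodup_keys_foldl_insert L _ _ PySem.Dict.nodup_keys_empty
  have hkeys : d.keys = PySem.List.dedup L := by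
    rw [hd, PySem.Dict.keys_foldl_insert]
    simp [PySem.Set.update, PySem.Set.ofList_eq_foldl, PySem.Dict.keys_empty]
  have hvals : ∀ w ∈ d.values, w = (1 : Int) := by
    refine pvFold_values L PySem.Dict.empty ?_
    simp [PySem.Dict.empty, PySem.Dict.values]
  rw [PySem.Dict.items_eq_map_keys d hnd 1, hkeys]
  refine List.map_congr_left ?_
  intro k hk
  have hk' : k ∈ d.keys := by rw [hkeys]; exact hk
  have hc : d.contains k = true := (PySem.Dict.contains_iff_mem_keys d k).mpr hk'
  rcases hget : d.get? k with _ | v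
  · exact absurd ((PySem.Dict.get?_eq_none_iff_contains d k).mp hget) (by simp [hc])
  · have hv : v ∈ d.values := by
      have := PySem.Dict.mem_items_of_get?_eq_some d hget
      simp only [PySem.Dict.values]
      exact List.mem_map.mpr ⟨(k, v), this, rfl⟩
    rw [PySem.Dict.getD_of_get?_eq_some d 1 hget, hvals v hv]

-- ===== VERDICT (by name: the statement is the Claim_ definition above) =====
theorem segment_ids_in_results_spec : Claim_equal_segment_ids_in_results := by
  intro results kwic_keys offset upper _ _
  unfold Spec_segment_ids_in_results segment_ids_in_results segment_ids_in_results_alt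
  dsimp only
  rw [pvLoop_eq]
  have hfilter : (results.filter (fun p => PySem.Set.contains (PySem.Set.ofList kwic_keys) p.1))
      = results.filter (fun p => kwic_keys.contains p.1) := by
    refine List.filter_congr ?_
    intro p _
    simp [PySem.Set.contains, PySem.Set.mem_ofList]
  rw [hfilter]
  set F := (results.filter (fun p => kwic_keys.contains p.1)).map (fun p => PySem.Int.toStr (p.2.headD 0)) with hF
  have h0 : (-1 : Int) + 1 = ((0 : Nat) : Int) := by norm_num
  rw [h0]
  cases upper with
  | none =>
    rw [pvWin_none, pvFold_items]
    have hs : PySem.List.slice F (some (max offset 0)) (some (PySem.List.len F))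
        = F.drop (offset.toNat - 0) := by
      rw [PySem.List.slice_toNat F (by omega) (by simp [PySem.List.len_eq])]
      have : (max offset 0).toNat = offset.toNat := by omega
      rw [this]
      simp [PySem.List.len_eq]
    rw [hs]
  | some u =>
    rw [pvWin_some, pvFold_items]
    have hs : PySem.List.slice F (some (max offset 0)) (some (max u 0))
        = (F.take (u.toNat - 0)).drop (offset.toNat - 0) := by
      rw [PySem.List.slice_toNat F (by omega) (by omega)]
      have h1 : (max offset 0).toNat = offset.toNat := by omega
      have h2 : (max u 0).toNat = u.toNat := by omega
      rw [h1, h2, List.drop_take]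
      simp
    rw [hs]
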